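-- pv_equiv track=rewrite | github.com/Uchiha-Hamza/SNCF-ST7-Project | data_processor.py | extraire_meme_jour
-- ===== SOURCE A (Python) =====
-- def extraire_meme_jour(dictionnaire):
--     """
--     Cette fonction prend en entrée un dictionnaire dont les clés sont de la forme (roulement, agent, (jour, bloc horaire)).
--     Elle extrait les couples (jour, bloc horaire) qui correspondent au même jour pour chaque (roulement, agent).
--     La sortie est un dictionnaire où les clés sont les couples (roulement, agent) et les valeurs sont des dictionnaires
--     dont les clés sont les jours et les valeurs sont des tuples (jour, bloc horaire) associés à ces jours pour ce couple.
--     """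
--     result = {}
--     for cle, _ in dictionnaire.items():
--         roulement, agent, (jour, bloc_horaire) = cle
--         cle_roulement_agent = (roulement, agent)
--         if cle_roulement_agent in result:
--             if jour in result[cle_roulement_agent]:
--                 result[cle_roulement_agent][jour].append((jour,bloc_horaire))
--             else:
--                 result[cle_roulement_agent][jour] = [(jour,bloc_horaire)]
--         else:
--             result[cle_roulement_agent] = {jour: [(jour,bloc_horaire)]}
--
--     return result
-- ===== SOURCE B (Python) =====
-- def extraire_meme_jour(dictionnaire):
--     # Two passes: first group all (jour, bloc) pairs per (roulement, agent),
--     # then regroup each pair's flat list by day.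
--     groups = {}
--     for (roulement, agent, (jour, bloc_horaire)) in dictionnaire:
--         groups.setdefault((roulement, agent), []).append((jour, bloc_horaire))
--     result = {}
--     for cle_roulement_agent, pairs in groups.items():
--         by_day = {}
--         for (jour, bloc_horaire) in pairs:
--             by_day.setdefault(jour, []).append((jour, bloc_horaire))
--         result[cle_roulement_agent] = by_day
--     return result
-- ===== Notes on version B (the rewrite author's own statement) =====
-- stated objective: alternative
-- what changed: B replaces A's single nested pass that mutates a nested dict inline by a two-pass decomposition: first a flat grouping of all (jour, bloc) pairs per (roulement, agent), then a second pass that regroups each flat list by day.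
import Mathlib
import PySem

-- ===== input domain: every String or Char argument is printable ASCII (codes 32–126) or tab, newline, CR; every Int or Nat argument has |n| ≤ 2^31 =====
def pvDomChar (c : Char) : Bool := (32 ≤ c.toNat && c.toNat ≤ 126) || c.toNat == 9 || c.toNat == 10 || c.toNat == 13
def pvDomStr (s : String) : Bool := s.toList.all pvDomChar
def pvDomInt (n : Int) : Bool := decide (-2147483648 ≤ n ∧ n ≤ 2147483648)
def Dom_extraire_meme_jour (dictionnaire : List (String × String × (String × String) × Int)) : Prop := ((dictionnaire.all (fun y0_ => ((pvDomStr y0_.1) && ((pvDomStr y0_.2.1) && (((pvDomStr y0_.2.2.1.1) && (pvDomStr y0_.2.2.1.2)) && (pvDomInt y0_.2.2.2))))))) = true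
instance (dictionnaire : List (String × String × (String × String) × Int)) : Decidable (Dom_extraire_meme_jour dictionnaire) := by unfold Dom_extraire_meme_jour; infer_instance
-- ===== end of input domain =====

-- B does the grouping in two passes (flat per-(roulement,agent) lists, then a per-day regroup) instead of A's single nested pass; alternative decomposition, same cost.


-- ===== PORT A =====
-- Python dict mutation ported by hand as first-match assoc-list update (exact:
-- every dict here is built with distinct keys, and lookup/update is first match).
-- inner 'if jour in result[k]: append else: new entry' of A's loop body
def pvAInner (jour bloc : String) : List (String × List (String × String)) → List (String × List (String × String))
  | [] => [(jour, [(jour, bloc)])]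
  | (j, l) :: t => if j = jour then (j, l ++ [(jour, bloc)]) :: t else (j, l) :: pvAInner jour bloc t

-- outer 'if cle_roulement_agent in result: … else: result[k] = {jour: [(jour,bloc)]}'
def pvAIns (r a jour bloc : String) : List (String × String × List (String × List (String × String))) → List (String × String × List (String × List (String × String)))
  | [] => [(r, a, [(jour, [(jour, bloc)])])]
  | (r', a', inner) :: t =>
      if (r', a') = (r, a) then (r', a', pvAInner jour bloc inner) :: t
      else (r', a', inner) :: pvAIns r a jour bloc t

def extraire_meme_jour (dictionnaire : List (String × String × (String × String) × Int)) : List (String × String × List (String × List (String × String))) :=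
  dictionnaire.foldl (fun result e => pvAIns e.1 e.2.1 e.2.2.1.1 e.2.2.1.2 result) []

-- ===== PORT B =====
-- first pass: groups.setdefault((roulement, agent), []).append((jour, bloc))
def pvGroupAdd (k : String × String) (p : String × String) : List ((String × String) × List (String × String)) → List ((String × String) × List (String × String))
  | [] => [(k, [p])]
  | (k', l) :: t => if k' = k then (k', l ++ [p]) :: t else (k', l) :: pvGroupAdd k p t

-- second pass, per pair: by_day.setdefault(jour, []).append((jour, bloc))
def pvDayAdd (jour bloc : String) : List (String × List (String × String)) → List (String × List (String × String))
  | [] => [(jour, [(jour, bloc)])]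
  | (j, l) :: t => if j = jour then (j, l ++ [(jour, bloc)]) :: t else (j, l) :: pvDayAdd jour bloc t

def pvByDay (pairs : List (String × String)) : List (String × List (String × String)) :=
  pairs.foldl (fun acc p => pvDayAdd p.1 p.2 acc) []

def extraire_meme_jour_alt (dictionnaire : List (String × String × (String × String) × Int)) : List (String × String × List (String × List (String × String))) :=
  (dictionnaire.foldl (fun g e => pvGroupAdd (e.1, e.2.1) e.2.2.1 g) []).map
    (fun kl => (kl.1.1, kl.1.2, pvByDay kl.2))

-- ===== PRECONDITION & SPEC =====
-- decidable equality of the output type, given as an explicit term (full instance search fails at this depth)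
def pvDecEqOut : DecidableEq (List (String × String × List (String × List (String × String)))) :=
  @instDecidableEqList _ (@instDecidableEqProd _ _ instDecidableEqString
    (@instDecidableEqProd _ _ instDecidableEqString
      (@instDecidableEqList _ (@instDecidableEqProd _ _ instDecidableEqString
        (@instDecidableEqList _ (@instDecidableEqProd _ _ instDecidableEqString instDecidableEqString))))))

def Spec_extraire_meme_jour (dictionnaire : List (String × String × (String × String) × Int)) (out : List (String × String × List (String × List (String × String)))) : Prop := out = extraire_meme_jour_alt dictionnaire
instance (dictionnaire : List (String × String × (String × String) × Int)) (out : List (String × String × List (String × List (String × String)))) : Decidable (Spec_extraire_meme_jour dictionnaire out) := by unfold Spec_extraire_meme_jour; exact pvDecEqOut out _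

-- ===== CLAIM (what is proved, stated in full; the proofs are below) =====
def Claim_equal_extraire_meme_jour : Prop := ∀ (dictionnaire : List (String × String × (String × String) × Int)), Dom_extraire_meme_jour dictionnaire → Spec_extraire_meme_jour dictionnaire (extraire_meme_jour dictionnaire)

-- ===== LEMMAS AND PROOFS =====
def pvRender (g : List ((String × String) × List (String × String))) : List (String × String × List (String × List (String × String))) :=
  g.map (fun kl => (kl.1.1, kl.1.2, pvByDay kl.2))

theorem pvAInner_eq_dayAdd (jour bloc : String) (l : List (String × List (String × String))) :
    pvAInner jour bloc l = pvDayAdd jour bloc l := by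
  induction l with
  | nil => rfl
  | cons h t ih => cases h with | mk j v => simp [pvAInner, pvDayAdd, ih]

theorem pvByDay_append (pairs : List (String × String)) (p : String × String) :
    pvByDay (pairs ++ [p]) = pvDayAdd p.1 p.2 (pvByDay pairs) := by
  simp [pvByDay]

theorem pvStep_render (r a jour bloc : String) (g : List ((String × String) × List (String × String))) :
    pvAIns r a jour bloc (pvRender g) = pvRender (pvGroupAdd (r, a) (jour, bloc) g) := by
  induction g with
  | nil => simp [pvRender, pvAIns, pvGroupAdd, pvByDay, pvDayAdd]
  | cons h t ih =>
    obtain ⟨k, pairs⟩ := h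
    by_cases hk : k = (r, a)
    · subst hk
      simp [pvRender, pvAIns, pvGroupAdd, pvByDay_append, pvAInner_eq_dayAdd]
    · have hk' : (k.1, k.2) ≠ (r, a) := by simpa using hk
      simp only [pvRender, List.map_cons] at ih ⊢
      simp [pvAIns, pvGroupAdd, hk, ih]

theorem pvFold_render (d : List (String × String × (String × String) × Int))
    (g : List ((String × String) × List (String × String))) :
    d.foldl (fun result e => pvAIns e.1 e.2.1 e.2.2.1.1 e.2.2.1.2 result) (pvRender g)
      = pvRender (d.foldl (fun g e => pvGroupAdd (e.1, e.2.1) e.2.2.1 g) g) := by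
  induction d generalizing g with
  | nil => rfl
  | cons e t ih =>
    simp only [List.foldl_cons]
    rw [show pvAIns e.1 e.2.1 e.2.2.1.1 e.2.2.1.2 (pvRender g)
          = pvRender (pvGroupAdd (e.1, e.2.1) e.2.2.1 g) from pvStep_render _ _ _ _ g]
    exact ih _

-- ===== VERDICT (by name: the statement is the Claim_ definition above) =====
theorem extraire_meme_jour_spec : Claim_equal_extraire_meme_jour := by
  intro d _
  show extraire_meme_jour d = extraire_meme_jour_alt d
  have h := pvFold_render d []
  simpa [extraire_meme_jour, extraire_meme_jour_alt, pvRender] using h
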